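-- pv_equiv track=rewrite | github.com/SabatierBoris/adventofcode | 2019/04/common.py | never_decrease_filter
-- ===== SOURCE A (Python) =====
-- def never_decrease_filter(password):
--     previous = 10
--     while password > 0:
--         current = password % 10
--         if previous < current:
--             return False
--         previous = current
--         password //= 10
--     return True
-- ===== SOURCE B (Python) =====
-- def never_decrease_filter(password):
--     s = str(password)
--     return sorted(s) == list(s)
-- ===== Notes on version B (the rewrite author's own statement) =====
-- stated objective: idiomatic
-- what changed: Replaces the modulo/floor-division digit-extraction loop with the idiomatic sorted(str(password)) == list(str(password)) check: the digit string is non-decreasing iff sorting it leaves it unchanged.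
-- outside the precondition, e.g. on never_decrease_filter(-21): A returns True, B returns False
import Mathlib
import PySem

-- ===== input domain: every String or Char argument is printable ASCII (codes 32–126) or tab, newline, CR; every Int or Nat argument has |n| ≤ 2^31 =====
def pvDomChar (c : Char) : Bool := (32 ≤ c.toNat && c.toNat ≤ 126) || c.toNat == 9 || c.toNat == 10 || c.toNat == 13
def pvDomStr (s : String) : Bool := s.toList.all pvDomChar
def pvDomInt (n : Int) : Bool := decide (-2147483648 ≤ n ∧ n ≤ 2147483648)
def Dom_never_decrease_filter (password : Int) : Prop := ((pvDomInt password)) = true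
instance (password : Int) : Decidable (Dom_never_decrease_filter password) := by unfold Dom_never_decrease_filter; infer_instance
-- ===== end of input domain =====

-- B replaces A's modulo/floor-division digit loop by the idiomatic check
-- sorted(str(password)) == list(str(password)); equivalence proved for 0 ≤ password.


-- ===== PORT A =====
-- the `while password > 0` loop, carrying `previous`
def neverDecLoop (previous password : Int) : Bool :=
  if _h : password > 0 then
    let current := PySem.Int.mod password 10
    if previous < current then false
    else neverDecLoop current (PySem.Int.floordiv password 10)
  else true
termination_by password.toNat
decreasing_by
  rw [PySem.Int.floordiv_eq_ediv_of_pos (by norm_num : (0:Int) < 10)]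
  omega

def never_decrease_filter (password : Int) : Bool := neverDecLoop 10 password

-- ===== PORT B =====
def never_decrease_filter_alt (password : Int) : Bool :=
  let s := PySem.Int.toChars password                    -- list(str(password))
  decide (PySem.List.sorted s (fun c => c) false = s)    -- sorted(s) == list(s)

-- ===== PRECONDITION & SPEC =====
-- Pre_ excludes negative passwords, on which A's vacuous True (the loop body never runs)
-- and B's comparison that includes the '-' sign character are both accidental corner behaviours.
def Pre_never_decrease_filter (password : Int) : Prop := 0 ≤ password
instance (password : Int) : Decidable (Pre_never_decrease_filter password) := by unfold Pre_never_decrease_filter; infer_instance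
def pvWitness_never_decrease_filter : Int := (123)

def Spec_never_decrease_filter (password : Int) (out : Bool) : Prop := out = never_decrease_filter_alt password
instance (password : Int) (out : Bool) : Decidable (Spec_never_decrease_filter password out) := by unfold Spec_never_decrease_filter; infer_instance

-- ===== CLAIM (what is proved, stated in full; the proofs are below) =====
def Claim_equal_never_decrease_filter : Prop := ∀ (password : Int), Dom_never_decrease_filter password → Pre_never_decrease_filter password → Spec_never_decrease_filter password (never_decrease_filter password)

-- ===== LEMMAS AND PROOFS =====

-- proof-only model of A's loop over the LSB-first digit list
def chkDigits (prev : Int) : List Nat → Bool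
  | [] => true
  | d :: t => if prev < (d : Int) then false else chkDigits (d : Int) t

-- `Nat.toDigitsCore` pulls its accumulator out
theorem toDigitsCore_acc (f : Nat) : ∀ (n : Nat) (acc : List Char),
    Nat.toDigitsCore 10 f n acc = Nat.toDigitsCore 10 f n [] ++ acc := by
  induction f with
  | zero => intro n acc; simp [Nat.toDigitsCore]
  | succ f ih =>
    intro n acc
    simp only [Nat.toDigitsCore]
    by_cases h : n / 10 = 0
    · simp [h]
    · simp only [h]
      rw [ih (n / 10) [Nat.digitChar (n % 10)], ih (n / 10) (Nat.digitChar (n % 10) :: acc)]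
      simp

-- fuel irrelevance: any fuel > n computes the same digits
theorem toDigitsCore_fuel : ∀ (n f g : Nat), n < f → n < g →
    Nat.toDigitsCore 10 f n [] = Nat.toDigitsCore 10 g n [] := by
  intro n
  induction n using Nat.strong_induction_on with
  | _ n ih =>
    intro f g hf hg
    match f, g with
    | f + 1, g + 1 =>
      simp only [Nat.toDigitsCore]
      by_cases h : n / 10 = 0
      · simp [h]
      · simp only [h]
        rw [toDigitsCore_acc f, toDigitsCore_acc g]
        have hlt : n / 10 < n := by omega
        rw [ih (n / 10) hlt f g (by omega) (by omega)]

theorem toDigits_step {n : Nat} (h : 10 ≤ n) :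
    Nat.toDigits 10 n = Nat.toDigits 10 (n / 10) ++ [Nat.digitChar (n % 10)] := by
  have hne : n / 10 ≠ 0 := by omega
  show Nat.toDigitsCore 10 (n + 1) n [] = _
  simp only [Nat.toDigitsCore, hne]
  rw [toDigitsCore_acc n]
  rw [toDigitsCore_fuel (n / 10) n (n / 10 + 1) (by omega) (by omega)]
  rfl

theorem toDigits_small {n : Nat} (h : n < 10) : Nat.toDigits 10 n = [Nat.digitChar n] := by
  have h0 : n / 10 = 0 := Nat.div_eq_of_lt h
  show Nat.toDigitsCore 10 (n + 1) n [] = _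
  simp [Nat.toDigitsCore, h0, Nat.mod_eq_of_lt h]

-- str(n) for positive n is the MSB-first digit list rendered by digitChar
theorem toDigits_eq_digits (n : Nat) (hn : 0 < n) :
    Nat.toDigits 10 n = ((Nat.digits 10 n).reverse.map Nat.digitChar) := by
  induction n using Nat.strong_induction_on with
  | _ n ih =>
    by_cases h : n < 10
    · rw [toDigits_small h, Nat.digits_def' (by norm_num : 1 < 10) hn,
        Nat.div_eq_of_lt h, Nat.mod_eq_of_lt h]
      simp
    · replace h : 10 ≤ n := by omega
      rw [toDigits_step h, Nat.digits_def' (by norm_num : 1 < 10) hn]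
      have h10 : 0 < n / 10 := Nat.div_pos h (by norm_num)
      rw [ih (n / 10) (Nat.div_lt_self hn (by norm_num)) h10]
      simp

-- digitChar is monotone on digits
theorem digitChar_le_iff {d e : Nat} (hd : d < 10) (he : e < 10) :
    (Nat.digitChar d ≤ Nat.digitChar e) ↔ d ≤ e := by
  interval_cases d <;> interval_cases e <;> decide

-- A's loop is chkDigits over the LSB-first digit list
theorem neverDecLoop_eq_chk (n : Nat) : ∀ prev : Int,
    neverDecLoop prev (n : Int) = chkDigits prev (Nat.digits 10 n) := by
  induction n using Nat.strong_induction_on with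
  | _ n ih =>
    intro prev
    by_cases hn : n = 0
    · subst hn
      rw [neverDecLoop]
      simp [chkDigits]
    · rw [neverDecLoop]
      have hpos : (0 : Int) < (n : Int) := by exact_mod_cast Nat.pos_of_ne_zero hn
      simp only [gt_iff_lt, dif_pos hpos]
      rw [Nat.digits_def' (by norm_num : 1 < 10) (Nat.pos_of_ne_zero hn)]
      simp only [chkDigits]
      have hmod : PySem.Int.mod (n : Int) 10 = ((n % 10 : Nat) : Int) := by
        exact_mod_cast PySem.Int.mod_natCast n 10
      have hdiv : PySem.Int.floordiv (n : Int) 10 = ((n / 10 : Nat) : Int) := by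
        exact_mod_cast PySem.Int.floordiv_natCast n 10
      rw [hmod, hdiv]
      by_cases hlt : prev < ((n % 10 : Nat) : Int)
      · rw [if_pos hlt, if_pos hlt]
      · rw [if_neg hlt, if_neg hlt]
        exact ih (n / 10) (Nat.div_lt_self (Nat.pos_of_ne_zero hn) (by norm_num)) _

-- chkDigits succeeds iff the first digit is ≤ prev and the LSB-first list is nonincreasing
theorem chkDigits_iff (L : List Nat) : ∀ prev : Int,
    chkDigits prev L = true ↔
      (∀ d ∈ L.head?, (d : Int) ≤ prev) ∧ L.Pairwise (fun a b => b ≤ a) := by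
  induction L with
  | nil => intro prev; simp [chkDigits]
  | cons d t ih =>
    intro prev
    simp only [chkDigits]
    by_cases hlt : prev < (d : Int)
    · rw [if_pos hlt]
      refine iff_of_false (by simp) ?_
      rintro ⟨h1, -⟩
      exact absurd (h1 d rfl) (by omega)
    · rw [if_neg hlt, ih, List.pairwise_cons]
      constructor
      · rintro ⟨h1, h2⟩
        refine ⟨?_, ?_, h2⟩
        · intro x hx; cases hx; omega
        · intro b hb
          cases t with
          | nil => cases hb
          | cons e t' =>
            have hed : e ≤ d := by exact_mod_cast h1 e rfl
            rcases List.mem_cons.mp hb with rfl | hb'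
            · exact hed
            · exact le_trans (List.rel_of_pairwise_cons h2 hb') hed
      · rintro ⟨hdp, hall, h2⟩
        refine ⟨?_, h2⟩
        intro x hx
        have : x ≤ d := hall x (List.mem_of_mem_head? hx)
        exact_mod_cast this

-- sorted(s) == s  ↔  s is nondecreasing
theorem sorted_id_eq_iff (s : List Char) :
    PySem.List.sorted s (fun c => c) false = s ↔ s.Pairwise (· ≤ ·) := by
  constructor
  · intro h
    have hp := PySem.List.sorted_pairwise s (fun c : Char => c)
    rw [h] at hp
    exact hp
  · exact PySem.List.sorted_eq_self_of_pairwise s (fun c : Char => c)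

-- ===== VERDICT (by name: the statement is the Claim_ definition above) =====
theorem never_decrease_filter_spec : Claim_equal_never_decrease_filter := by
  intro p _ hpre
  unfold Spec_never_decrease_filter never_decrease_filter never_decrease_filter_alt
  obtain ⟨n, rfl⟩ : ∃ m : Nat, p = (m : Int) := ⟨p.toNat, (Int.toNat_of_nonneg hpre).symm⟩
  have hchars : PySem.Int.toChars (n : Int) = Nat.toDigits 10 n := by
    simp [PySem.Int.toChars]
  rw [neverDecLoop_eq_chk]
  by_cases hn : n = 0
  · subst hn
    simp only [hchars]
    simp [chkDigits, Nat.toDigits]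
    decide
  · have hpos : 0 < n := Nat.pos_of_ne_zero hn
    rw [Bool.eq_iff_iff, chkDigits_iff, decide_eq_true_iff, sorted_id_eq_iff, hchars,
      toDigits_eq_digits n hpos, List.pairwise_map, List.pairwise_reverse]
    have hbound : ∀ d ∈ Nat.digits 10 n, d < 10 :=
      fun d hd => Nat.digits_lt_base (by norm_num) hd
    constructor
    · rintro ⟨-, h2⟩
      exact h2.imp_of_mem fun {a b} ha hb hab =>
        (digitChar_le_iff (hbound b hb) (hbound a ha)).mpr hab
    · intro h
      refine ⟨?_, h.imp_of_mem fun {a b} ha hb hab =>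
        (digitChar_le_iff (hbound b hb) (hbound a ha)).mp hab⟩
      intro d hd
      have : d < 10 := hbound d (List.mem_of_mem_head? hd)
      exact_mod_cast Nat.le_of_lt_succ (by omega)
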